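-- pv_equiv track=rewrite | github.com/mins1031/coding-test | programmers/Ace1.py | solution
-- ===== SOURCE A (Python) =====
-- def solution(n, v):
--     answer = 0
--     total_gap = [0] * (n + 1)
--
--     total_left = 0
--     total_right = sum(v)
--     for i in range(n+1):
--         if i == 0:
--             total_gap[i] = abs(total_right - total_left)
--             continue
--         total_left += v[i-1]
--         total_right -= v[i-1]
--
--         temp_total = total_left - total_right
--         total_gap[i] = abs(temp_total)
--
--     minimum_value = min(total_gap)
--
--     for i in range(n + 1):
--         if total_gap[i] == minimum_value:
--             answer = i
--             break
--
--     return answer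
-- ===== SOURCE B (Python) =====
-- def solution(n, v):
--     total = sum(v)
--     pairs = []
--     left = 0
--     for i in range(n + 1):
--         pairs.append((abs(2 * left - total), i))
--         if i < n:
--             left += v[i]
--     return sorted(pairs)[0][1]
-- ===== Notes on version B (the rewrite author's own statement) =====
-- stated objective: alternative
-- what changed: B replaces A's gap array + separate min pass + first-match rescan by building (gap, index) pairs in one pass and sorting them lexicographically, returning the index component of the smallest pair (tuple order makes the earliest minimal index win).
import Mathlib
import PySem

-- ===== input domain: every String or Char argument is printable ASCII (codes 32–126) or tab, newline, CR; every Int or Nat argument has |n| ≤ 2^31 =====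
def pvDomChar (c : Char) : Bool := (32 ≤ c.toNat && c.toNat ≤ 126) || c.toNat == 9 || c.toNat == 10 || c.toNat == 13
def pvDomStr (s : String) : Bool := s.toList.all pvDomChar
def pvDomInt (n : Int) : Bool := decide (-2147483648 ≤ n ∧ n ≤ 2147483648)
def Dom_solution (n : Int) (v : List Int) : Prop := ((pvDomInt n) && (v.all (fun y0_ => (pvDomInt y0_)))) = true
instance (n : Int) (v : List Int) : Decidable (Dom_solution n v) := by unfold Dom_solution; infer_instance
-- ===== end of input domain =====

-- B replaces A's gap array + min pass + first-match rescan by sorting (gap, index) pairs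
-- lexicographically and taking the smallest pair's index; objective: alternative (sort-then-pick).

-- ===== PORT A =====
-- body of A's first loop (one iteration)
def solutionStepA (v : List Int) (st : Int × Int × List Int) (i : Int) : Int × Int × List Int :=
  if i == 0 then (st.1, st.2.1, st.2.2.set i.toNat |st.2.1 - st.1|)
  else
    let x := (PySem.List.pyGet? v (i - 1)).getD 0   -- v[i-1]; in range under Pre_ (IndexError excluded)
    let tl := st.1 + x
    let tr := st.2.1 - x
    (tl, tr, st.2.2.set i.toNat |tl - tr|)

-- A's second loop: first index i in idxs with total_gap[i] == m ('break'), else the initial answer 0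
def solutionScanA (g : List Int) (m : Int) : List Int → Int
  | [] => 0
  | i :: rest =>
    if (PySem.List.pyGet? g i).getD 0 == m then i else solutionScanA g m rest

def solution (n : Int) (v : List Int) : Int :=
  let total_gap0 : List Int := List.replicate (n + 1).toNat 0   -- [0] * (n+1)
  let st := (PySem.List.pyRange 0 (n + 1) 1).foldl (solutionStepA v) (0, v.sum, total_gap0)
  let total_gap := st.2.2
  match PySem.List.min? total_gap (fun x => x) with
  | none => 0   -- Python raises ValueError on min([]) (only when n < 0); excluded by Pre_
  | some m => solutionScanA total_gap m (PySem.List.pyRange 0 (n + 1) 1)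

-- ===== PORT B =====
-- body of B's loop (one iteration): append the (gap, index) pair, then advance the prefix sum
def solutionStepB (n : Int) (v : List Int) (total : Int)
    (st : List (Int × Int) × Int) (i : Int) : List (Int × Int) × Int :=
  (st.1 ++ [(|2 * st.2 - total|, i)],
   if i < n then st.2 + (PySem.List.pyGet? v i).getD 0 else st.2)   -- v[i]; in range under Pre_

def solution_alt (n : Int) (v : List Int) : Int :=
  let total := v.sum
  let st := (PySem.List.pyRange 0 (n + 1) 1).foldl (solutionStepB n v total) ([], 0)
  -- sorted(pairs): Python sorts int tuples lexicographically = PySem.List.sorted2 with fst/snd keys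
  ((PySem.List.pyGet? (PySem.List.sorted2 st.1 Prod.fst Prod.snd) 0).getD (0, 0)).2
  -- pairs[0]; nonempty under Pre_ (IndexError excluded)

-- ===== PRECONDITION & SPEC =====
-- A raises ValueError when n < 0 (min of the empty gap list) and IndexError when n > len(v); both excluded.
def Pre_solution (n : Int) (v : List Int) : Prop := 0 ≤ n ∧ n ≤ v.length
instance (n : Int) (v : List Int) : Decidable (Pre_solution n v) := by unfold Pre_solution; infer_instance
def pvWitness_solution : Int × List Int := (3, [1, 4, -2, 5])

def Spec_solution (n : Int) (v : List Int) (out : Int) : Prop := out = solution_alt n v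
instance (n : Int) (v : List Int) (out : Int) : Decidable (Spec_solution n v out) := by unfold Spec_solution; infer_instance

-- ===== CLAIM (what is proved, stated in full; the proofs are below) =====
def Claim_equal_solution : Prop := ∀ (n : Int) (v : List Int), Dom_solution n v → Pre_solution n v → Spec_solution n v (solution n v)

-- ===== LEMMAS AND PROOFS =====

-- the gap at split point i: |left sum - right sum| = |2 * prefix - total|
def gapF (v : List Int) (i : Nat) : Int := |2 * (v.take i).sum - v.sum|

-- the gap list after k+1 iterations of A's first loop
def gapList (v : List Int) (k : Nat) : List Int := (List.range (k + 1)).map (gapF v)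

-- the running minimum of gapF v 0 .. gapF v k
def minGap (v : List Int) (k : Nat) : Int :=
  ((List.range k).map (fun j => gapF v (j + 1))).foldl min (gapF v 0)

-- the pair list B builds after k+1 iterations
def pairsList (v : List Int) (k : Nat) : List (Int × Int) :=
  (List.range (k + 1)).map (fun i => (gapF v i, (i : Int)))

theorem gapList_eq_cons (v : List Int) (k : Nat) :
    gapList v k = gapF v 0 :: (List.range k).map (fun j => gapF v (j + 1)) := by
  simp [gapList, List.range_succ_eq_map, Function.comp_def]

theorem gapList_succ (v : List Int) (k : Nat) :
    gapList v (k + 1) = gapList v k ++ [gapF v (k + 1)] := by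
  simp [gapList, List.range_succ]

theorem length_gapList (v : List Int) (k : Nat) : (gapList v k).length = k + 1 := by
  simp [gapList]

theorem min?_gapList (v : List Int) (k : Nat) :
    PySem.List.min? (gapList v k) (fun x => x) = some (minGap v k) := by
  rw [gapList_eq_cons]; exact PySem.List.min?_id_cons _ _

theorem minGap_mem (v : List Int) (k : Nat) : minGap v k ∈ gapList v k :=
  PySem.List.min?_mem (min?_gapList v k)

theorem minGap_isMin (v : List Int) (k : Nat) : ∀ y ∈ gapList v k, minGap v k ≤ y :=
  PySem.List.min?_isMin (min?_gapList v k)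

theorem gapF_succ (v : List Int) (k : Nat) (hk : k < v.length) :
    gapF v (k + 1) = |2 * ((v.take k).sum + v[k]) - v.sum| := by
  rw [gapF, List.sum_take_succ _ _ hk]

theorem getElem_gapList (v : List Int) (k : Nat) (i : Nat) (hi : i < (gapList v k).length) :
    (gapList v k)[i] = gapF v i := by
  simp [gapList]

-- invariant of A's first loop
theorem loopA_inv (v : List Int) (N : Nat) (hN : N ≤ v.length) :
    ∀ k, k ≤ N →
      (PySem.List.pyRange 0 ((k : Int) + 1) 1).foldl (solutionStepA v)
          (0, v.sum, List.replicate (N + 1) 0)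
        = ((v.take k).sum, v.sum - (v.take k).sum, gapList v k ++ List.replicate (N - k) 0) := by
  intro k
  induction k with
  | zero =>
    intro _
    have h1 : PySem.List.pyRange 0 ((0 : Int) + 1) 1 = [0] := by
      simpa using PySem.List.pyRange_one_singleton (a := 0)
    simp only [Nat.cast_zero, h1, List.foldl_cons, List.foldl_nil]
    have hrep : List.replicate (N + 1) (0 : Int) = 0 :: List.replicate N 0 := rfl
    simp [solutionStepA, hrep, gapList, gapF]
  | succ k ih =>
    intro hk1
    have hk : k ≤ N := Nat.le_of_succ_le hk1
    have hkv : k < v.length := lt_of_lt_of_le hk1 hN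
    have hsplit : PySem.List.pyRange 0 (((k + 1 : Nat) : Int) + 1) 1
        = PySem.List.pyRange 0 ((k : Int) + 1) 1 ++ [(k : Int) + 1] := by
      push_cast
      exact PySem.List.pyRange_one_succ_right (by omega)
    rw [hsplit, List.foldl_append, ih hk]
    have hget : PySem.List.pyGet? v (((k : Int) + 1) - 1) = some v[k] := by
      have : ((k : Int) + 1) - 1 = ((k : Nat) : Int) := by omega
      rw [this, PySem.List.pyGet?_natCast, List.getElem?_eq_getElem hkv]
    have hne : (((k : Int) + 1) == 0) = false := by
      simp; omega
    have htoNat : ((k : Int) + 1).toNat = k + 1 := by omega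
    have hset : (gapList v k ++ List.replicate (N - k) (0 : Int)).set (k + 1)
          |((v.take k).sum + v[k]) - (v.sum - (v.take k).sum - v[k])|
        = gapList v (k + 1) ++ List.replicate (N - (k + 1)) 0 := by
      have hlen : (gapList v k).length = k + 1 := length_gapList v k
      have hrep : List.replicate (N - k) (0 : Int) = 0 :: List.replicate (N - (k + 1)) 0 := by
        have : N - k = (N - (k + 1)) + 1 := by omega
        rw [this]; rfl
      rw [hrep, gapList_succ]
      rw [List.set_append_right _ _ hlen.le]
      have hg : gapF v (k + 1) = |((v.take k).sum + v[k]) - (v.sum - (v.take k).sum - v[k])| := by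
        rw [gapF_succ v k hkv]; ring_nf
      simp [hlen, hg]
    simp only [List.foldl_cons, List.foldl_nil, solutionStepA, hne, Bool.false_eq_true,
      if_false, hget, Option.getD_some, htoNat]
    rw [hset, List.sum_take_succ _ _ hkv]
    simp only [Prod.mk.injEq]
    exact ⟨by trivial, by ring, by trivial⟩

-- ----- B side -----

-- Python's '<' on int pairs, as sorted2 compares
def lexBefore (a b : Int × Int) : Bool :=
  decide (a.1 < b.1) || (!decide (b.1 < a.1) && decide (a.2 < b.2))

theorem sorted2_eq_foldl (xs : List (Int × Int)) :
    PySem.List.sorted2 xs Prod.fst Prod.snd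
      = xs.foldl (fun acc x => PySem.List.insertBy lexBefore x acc) [] := rfl

theorem lexBefore_irrefl (a : Int × Int) : lexBefore a a = false := by
  simp [lexBefore]

theorem lexBefore_trans {a b c : Int × Int}
    (h1 : lexBefore a b = true) (h2 : lexBefore b c = true) : lexBefore a c = true := by
  rcases a with ⟨a1, a2⟩; rcases b with ⟨b1, b2⟩; rcases c with ⟨c1, c2⟩
  simp [lexBefore] at h1 h2 ⊢
  omega

theorem lexBefore_asymm {a b : Int × Int} (h : lexBefore a b = true) : lexBefore b a = false := by
  rcases a with ⟨a1, a2⟩; rcases b with ⟨b1, b2⟩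
  simp [lexBefore] at h ⊢
  omega

-- the head of l is lexicographically minimal in l
def IsHeadMin (l : List (Int × Int)) : Prop :=
  ∀ h t, l = h :: t → ∀ y ∈ l, lexBefore y h = false

theorem isHeadMin_nil : IsHeadMin [] := by
  intro h t heq; cases heq

theorem insertBy_nil_eq (x : Int × Int) :
    PySem.List.insertBy lexBefore x [] = [x] := rfl

theorem insertBy_cons_eq (x y : Int × Int) (ys : List (Int × Int)) :
    PySem.List.insertBy lexBefore x (y :: ys)
      = if lexBefore x y then x :: y :: ys else y :: PySem.List.insertBy lexBefore x ys := rfl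

theorem headMin_insertBy (x : Int × Int) (ys : List (Int × Int)) (hys : IsHeadMin ys) :
    IsHeadMin (PySem.List.insertBy lexBefore x ys) := by
  cases ys with
  | nil =>
    rw [insertBy_nil_eq]
    intro h t heq y hy
    cases heq
    simp at hy
    subst hy
    exact lexBefore_irrefl _
  | cons y ys' =>
    rw [insertBy_cons_eq]
    by_cases hb : lexBefore x y = true
    · rw [if_pos hb]
      intro h t heq z hz
      cases heq
      rcases List.mem_cons.mp hz with rfl | hz'
      · exact lexBefore_irrefl z
      rcases List.mem_cons.mp hz' with rfl | hz''
      · exact lexBefore_asymm hb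
      · by_contra hc
        have hzx : lexBefore z x = true := by
          cases hzx : lexBefore z x
          · exact absurd hzx hc
          · rfl
        have hzy : lexBefore z y = true := lexBefore_trans hzx hb
        have := hys y ys' rfl z (List.mem_cons_of_mem _ hz'')
        rw [this] at hzy
        cases hzy
    · rw [if_neg hb]
      intro h t heq z hz
      cases heq
      rcases List.mem_cons.mp hz with rfl | hz'
      · exact lexBefore_irrefl z
      rcases (PySem.List.insertBy_mem_iff _ _ _ _).mp hz' with rfl | hz''
      · cases hbx : lexBefore z y
        · rfl
        · exact absurd hbx hb
      · exact hys y ys' rfl z (List.mem_cons_of_mem _ hz'')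

theorem headMin_fold (xs : List (Int × Int)) :
    ∀ acc, IsHeadMin acc →
      IsHeadMin (xs.foldl (fun acc x => PySem.List.insertBy lexBefore x acc) acc) := by
  induction xs with
  | nil => intro acc hacc; exact hacc
  | cons x xs ih =>
    intro acc hacc
    exact ih _ (headMin_insertBy x acc hacc)

theorem headMin_sorted2 (xs : List (Int × Int)) :
    IsHeadMin (PySem.List.sorted2 xs Prod.fst Prod.snd) := by
  rw [sorted2_eq_foldl]
  exact headMin_fold xs [] isHeadMin_nil

-- idxOf minimality: an occurrence at i bounds idxOf
theorem idxOf_le_of_getElem (l : List Int) (a : Int) (i : Nat) (h : i < l.length)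
    (he : l[i] = a) : l.idxOf a ≤ i := by
  by_contra hc
  push Not at hc
  have h2 : i < List.findIdx (fun x => x == a) l := by simpa [List.idxOf] using hc
  have h3 := List.not_of_lt_findIdx h2
  simp at h3
  exact h3 he

-- invariant of B's loop: the pair list and the running prefix sum
theorem loopB_inv (v : List Int) (N : Nat) (hN : N ≤ v.length) :
    ∀ k, k ≤ N →
      (PySem.List.pyRange 0 ((k : Int) + 1) 1).foldl (solutionStepB (N : Int) v v.sum) ([], 0)
        = (pairsList v k, (v.take (min (k + 1) N)).sum) := by
  intro k
  induction k with
  | zero =>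
    intro _
    have h1 : PySem.List.pyRange 0 ((0 : Int) + 1) 1 = [0] := by
      simpa using PySem.List.pyRange_one_singleton (a := 0)
    simp only [Nat.cast_zero, h1, List.foldl_cons, List.foldl_nil, solutionStepB]
    by_cases hN0 : 0 < N
    · have h0v : 0 < v.length := lt_of_lt_of_le hN0 hN
      have hget : PySem.List.pyGet? v (0 : Int) = some v[0] := by
        have h00 : (0 : Int) = ((0 : Nat) : Int) := by norm_num
        rw [h00, PySem.List.pyGet?_natCast, List.getElem?_eq_getElem h0v]
      have hlt : ((0 : Int) < (N : Int)) := by exact_mod_cast hN0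
      have hmin : min 1 N = 1 := by omega
      have hsum : (v.take 1).sum = v[0] := by
        rw [List.sum_take_succ _ 0 h0v]; simp
      rw [if_pos hlt, hget]
      simp [pairsList, gapF, hmin, hsum]
    · have hN' : N = 0 := by omega
      subst hN'
      simp [pairsList, gapF]
  | succ k ih =>
    intro hk1
    have hk : k ≤ N := Nat.le_of_succ_le hk1
    have hkv : k < v.length := lt_of_lt_of_le hk1 hN
    have hsplit : PySem.List.pyRange 0 (((k + 1 : Nat) : Int) + 1) 1
        = PySem.List.pyRange 0 ((k : Int) + 1) 1 ++ [(k : Int) + 1] := by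
      push_cast
      exact PySem.List.pyRange_one_succ_right (by omega)
    rw [hsplit, List.foldl_append, ih hk]
    have hmink : min (k + 1) N = k + 1 := by omega
    have hpair : pairsList v k ++ [(|2 * (v.take (k + 1)).sum - v.sum|, (k : Int) + 1)]
        = pairsList v (k + 1) := by
      have : ((k : Int) + 1) = ((k + 1 : Nat) : Int) := by push_cast; ring
      rw [this]
      simp [pairsList, List.range_succ, gapF]
    by_cases hlt : k + 1 < N
    · have hklt : ((k : Int) + 1 < (N : Int)) := by exact_mod_cast hlt
      have hk1v : k + 1 < v.length := lt_of_lt_of_le hlt hN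
      have hget : PySem.List.pyGet? v ((k : Int) + 1) = some v[k + 1] := by
        have : ((k : Int) + 1) = ((k + 1 : Nat) : Int) := by push_cast; ring
        rw [this, PySem.List.pyGet?_natCast, List.getElem?_eq_getElem hk1v]
      have hmin2 : min (k + 1 + 1) N = k + 2 := by omega
      have hsum2 : (v.take (k + 1)).sum + v[k + 1] = (v.take (k + 2)).sum := by
        rw [List.sum_take_succ _ (k + 1) hk1v]
      simp only [List.foldl_cons, List.foldl_nil, solutionStepB, hmink, if_pos hklt,
        hget, Option.getD_some, hmin2]
      rw [hpair, hsum2]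
    · have hkeq : k + 1 = N := by omega
      have hnlt : ¬ ((k : Int) + 1 < (N : Int)) := by
        rw [← hkeq]; push_cast; omega
      have hmin2 : min (k + 1 + 1) N = k + 1 := by omega
      simp only [List.foldl_cons, List.foldl_nil, solutionStepB, hmink, if_neg hnlt, hmin2]
      rw [hpair]

-- the head of B's sorted pair list is (minGap, its first index)
theorem sorted2_pairs_head (v : List Int) (N : Nat) :
    ∃ t, PySem.List.sorted2 (pairsList v N) Prod.fst Prod.snd
        = (minGap v N, ((gapList v N).idxOf (minGap v N) : Int)) :: t := by
  have hperm : (PySem.List.sorted2 (pairsList v N) Prod.fst Prod.snd).Perm (pairsList v N) :=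
    PySem.List.sorted2_perm _ _ _ _
  have hlen : (pairsList v N).length = N + 1 := by simp [pairsList]
  -- the sorted list is nonempty
  cases hs : PySem.List.sorted2 (pairsList v N) Prod.fst Prod.snd with
  | nil =>
    rw [hs] at hperm
    have := hperm.length_eq
    simp [hlen] at this
  | cons h t =>
    -- the head is some pair (gapF i, i)
    have hmemh : h ∈ pairsList v N := hperm.mem_iff.mp (hs ▸ List.mem_cons_self)
    obtain ⟨i, hi, hh⟩ := List.mem_map.mp hmemh
    have hiN : i < N + 1 := List.mem_range.mp hi
    -- the candidate minimal pair
    set j := (gapList v N).idxOf (minGap v N) with hj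
    have hjlen : j < N + 1 := by
      have := List.idxOf_lt_length_of_mem (minGap_mem v N)
      rwa [length_gapList] at this
    have hgj : gapF v j = minGap v N := by
      have h5 := List.getElem_idxOf (List.idxOf_lt_length_of_mem (minGap_mem v N))
      rwa [getElem_gapList] at h5
    have hmemm : (minGap v N, (j : Int)) ∈ pairsList v N := by
      apply List.mem_map.mpr
      exact ⟨j, List.mem_range.mpr hjlen, by rw [hgj]⟩
    -- head minimality
    have hmin := headMin_sorted2 (pairsList v N) h t hs (minGap v N, (j : Int))
      (hperm.mem_iff.mpr hmemm)
    -- gapF v i is one of the gaps, so minGap ≤ gapF v i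
    have hgi_mem : gapF v i ∈ gapList v N := by
      have : (gapList v N)[i]'(by rw [length_gapList]; exact hiN) = gapF v i :=
        getElem_gapList v N i (by rw [length_gapList]; exact hiN)
      rw [← this]; exact List.getElem_mem _
    have hle : minGap v N ≤ gapF v i := minGap_isMin v N _ hgi_mem
    subst hh
    simp only [lexBefore, Bool.or_eq_false_iff, Bool.and_eq_false_iff,
      decide_eq_false_iff_not, Bool.not_eq_false', decide_eq_true_eq] at hmin
    -- the head's gap equals minGap
    have hgeq : gapF v i = minGap v N := le_antisymm (by omega) hle
    -- and its index is ≥ j and (by idxOf minimality) ≤ j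
    have hij : j ≤ i :=
      idxOf_le_of_getElem _ _ _ (by rw [length_gapList]; exact hiN)
        (by rw [getElem_gapList]; exact hgeq)
    have hieq : i = j := by
      rcases hmin.2 with h2 | h2 <;> omega
    exact ⟨t, by rw [hieq, hgj]⟩

-- A's second loop returns j + (first index of m in G.drop j), scanning indices j, j+1, …
theorem scanA_eq (G : List Int) (m : Int) :
    ∀ j : Nat, m ∈ G.drop j →
      solutionScanA G m (PySem.List.pyRange (j : Int) (G.length : Int) 1)
        = (j : Int) + ((G.drop j).idxOf m : Int) := by
  intro j
  induction hd : G.length - j generalizing j with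
  | zero =>
    intro hmem
    have : G.length ≤ j := by omega
    rw [List.drop_eq_nil_of_le this] at hmem
    simp at hmem
  | succ d ih =>
    intro hmem
    have hj : j < G.length := by omega
    have hcons : PySem.List.pyRange (j : Int) (G.length : Int) 1
        = (j : Int) :: PySem.List.pyRange ((j : Int) + 1) (G.length : Int) 1 :=
      PySem.List.pyRange_one_cons (by omega)
    have hget : PySem.List.pyGet? G (j : Int) = some G[j] := by
      rw [PySem.List.pyGet?_natCast, List.getElem?_eq_getElem hj]
    have hdrop : G.drop j = G[j] :: G.drop (j + 1) := List.drop_eq_getElem_cons hj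
    rw [hcons]
    simp only [solutionScanA, hget, Option.getD_some]
    by_cases heq : G[j] = m
    · rw [if_pos (by simpa using heq)]
      rw [hdrop, List.idxOf_cons_eq _ heq]
      simp
    · rw [if_neg (by simpa using heq)]
      have hmem' : m ∈ G.drop (j + 1) := by
        rw [hdrop] at hmem
        rcases List.mem_cons.mp hmem with h | h
        · exact absurd h.symm heq
        · exact h
      have hcast : ((j : Int) + 1) = ((j + 1 : Nat) : Int) := by push_cast; ring
      rw [hcast, ih (j + 1) (by omega) hmem']
      rw [hdrop, List.idxOf_cons_ne _ heq]
      push_cast; ring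

-- ===== VERDICT (by name: the statement is the Claim_ definition above) =====
theorem solution_spec : Claim_equal_solution := by
  intro n v _ hpre
  obtain ⟨hn, hlen⟩ := hpre
  obtain ⟨N, rfl⟩ : ∃ N : Nat, n = (N : Int) := ⟨n.toNat, by omega⟩
  have hNv : N ≤ v.length := by exact_mod_cast hlen
  have htn : ((N : Int) + 1).toNat = N + 1 := by omega
  -- A's value
  have hA := loopA_inv v N hNv N le_rfl
  simp only [Nat.sub_self, List.replicate_zero, List.append_nil] at hA
  -- B's value
  have hB := loopB_inv v N hNv N le_rfl
  obtain ⟨t, hsort⟩ := sorted2_pairs_head v N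
  simp only [Spec_solution, solution, solution_alt, htn, hA, hB, hsort]
  simp only [min?_gapList]
  have hmem : minGap v N ∈ (gapList v N).drop 0 := by
    simpa using minGap_mem v N
  have hscan := scanA_eq (gapList v N) (minGap v N) 0 hmem
  simp only [Nat.cast_zero, List.drop_zero, zero_add, length_gapList] at hscan
  push_cast at hscan
  rw [hscan]
  simp [PySem.List.pyGet?, PySem.List.pyIdx?]
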